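-- pv_equiv track=rewrite | github.com/avawda/CodeSignal-Python | oddNumbersBeforeZero.py | oddNumbersBeforeZero
-- ===== SOURCE A (Python) =====
-- def oddNumbersBeforeZero(sequence):
--     oddFound = 0
--     if 0 not in sequence:
--         return 0
--
--     for digit in sequence:
--         if digit == 0:
--             return oddFound
--         if digit % 2 != 0:
--             oddFound += 1
--     return oddFound
-- ===== SOURCE B (Python) =====
-- def oddNumbersBeforeZero(sequence):
--     # single pass over the REVERSED sequence: the counter is reset at every
--     # zero, so at the end it holds the number of odds before the FIRST zero;
--     # the flag records whether any zero occurred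
--     count, found = 0, False
--     for x in reversed(sequence):
--         if x == 0:
--             count, found = 0, True
--         elif x % 2 != 0:
--             count += 1
--     return count if found else 0
-- ===== Notes on version B (the rewrite author's own statement) =====
-- stated objective: alternative
-- what changed: Replaces A's two-phase forward form (a membership scan '0 in sequence' plus a forward loop with an early return and a running counter) by one backward pass (a right fold): scanning the reversed list, the counter is reset at every zero so it ends up holding the odd count before the first zero, and a flag records whether any zero occurred.
import Mathlib
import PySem

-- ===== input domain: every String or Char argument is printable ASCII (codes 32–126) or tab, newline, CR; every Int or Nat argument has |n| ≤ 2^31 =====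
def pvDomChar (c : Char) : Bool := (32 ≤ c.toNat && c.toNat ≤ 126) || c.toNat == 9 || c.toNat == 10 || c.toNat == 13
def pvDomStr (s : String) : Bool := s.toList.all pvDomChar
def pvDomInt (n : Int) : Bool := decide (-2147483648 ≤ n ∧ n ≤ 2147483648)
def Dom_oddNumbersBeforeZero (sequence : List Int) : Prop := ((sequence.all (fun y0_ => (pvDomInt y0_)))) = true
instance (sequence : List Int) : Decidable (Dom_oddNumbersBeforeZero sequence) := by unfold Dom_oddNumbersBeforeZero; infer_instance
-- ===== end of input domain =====

-- B replaces A's membership scan + forward early-return counting loop by a single backward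
-- pass (a fold over the reversed list) carrying a (count, zeroFound) pair (same cost).

-- ===== PORT A =====
-- the for-loop of A: early return on 0, else conditionally bump the counter
def pvLoopA : List Int → Int → Int
  | [], acc => acc
  | d :: rest, acc =>
      if d = 0 then acc
      else pvLoopA rest (if PySem.Int.mod d 2 ≠ 0 then acc + 1 else acc)

def oddNumbersBeforeZero (sequence : List Int) : Int :=
  if sequence.contains 0 then pvLoopA sequence 0 else 0

-- ===== PORT B =====
-- B's loop body: reset (count, found) at a zero, else conditionally bump the counter
def pvStepB (p : Int × Bool) (x : Int) : Int × Bool :=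
  if x = 0 then (0, true)
  else if PySem.Int.mod x 2 ≠ 0 then (p.1 + 1, p.2) else p

def oddNumbersBeforeZero_alt (sequence : List Int) : Int :=
  let p := sequence.reverse.foldl pvStepB (0, false)
  if p.2 then p.1 else 0

-- ===== PRECONDITION & SPEC =====
def Spec_oddNumbersBeforeZero (sequence : List Int) (out : Int) : Prop := out = oddNumbersBeforeZero_alt sequence
instance (sequence : List Int) (out : Int) : Decidable (Spec_oddNumbersBeforeZero sequence out) := by unfold Spec_oddNumbersBeforeZero; infer_instance

-- ===== CLAIM (what is proved, stated in full; the proofs are below) =====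
def Claim_equal_oddNumbersBeforeZero : Prop := ∀ (sequence : List Int), Dom_oddNumbersBeforeZero sequence → Spec_oddNumbersBeforeZero sequence (oddNumbersBeforeZero sequence)

-- ===== LEMMAS AND PROOFS =====

-- A's loop computes acc + (number of odds before the first zero), the prefix given by takeWhile
theorem pvLoopA_eq (l : List Int) (acc : Int) :
    pvLoopA l acc
      = acc + ((l.takeWhile (fun x => x != 0)).countP (fun x => PySem.Int.mod x 2 != 0) : Int) := by
  induction l generalizing acc with
  | nil => simp [pvLoopA]
  | cons d rest ih =>
      by_cases hd : d = 0
      · subst hd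
        have ht : List.takeWhile (fun x => x != 0) ((0 : Int) :: rest) = [] := by simp
        simp only [pvLoopA, ht]
        simp
      · have ht : List.takeWhile (fun x => x != 0) (d :: rest)
            = d :: List.takeWhile (fun x => x != 0) rest := by
          rw [List.takeWhile_cons]; simp [hd]
        simp only [pvLoopA, if_neg hd, ih, ht, List.countP_cons]
        by_cases ho : PySem.Int.mod d 2 ≠ 0
        · rw [if_pos ho]
          have hp : ((PySem.Int.mod d 2 != 0) = true) := by simpa using ho
          rw [if_pos hp]; push_cast; ring
        · rw [if_neg ho]
          have hp : ¬ ((PySem.Int.mod d 2 != 0) = true) := by simpa using ho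
          rw [if_neg hp]; push_cast; ring

-- B's backward fold computes (odd count of the before-first-zero prefix, whether a zero occurs)
theorem pvFoldB_eq (l : List Int) :
    l.reverse.foldl pvStepB (0, false)
      = (((l.takeWhile (fun x => x != 0)).countP (fun x => PySem.Int.mod x 2 != 0) : Int),
         l.contains 0) := by
  rw [List.foldl_reverse]
  induction l with
  | nil => simp
  | cons d rest ih =>
      rw [List.foldr_cons, ih]
      by_cases hd : d = 0
      · subst hd
        have ht : List.takeWhile (fun x => x != 0) ((0 : Int) :: rest) = [] := by simp
        simp [pvStepB, ht]
      · have ht : List.takeWhile (fun x => x != 0) (d :: rest)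
            = d :: List.takeWhile (fun x => x != 0) rest := by
          rw [List.takeWhile_cons]; simp [hd]
        simp only [pvStepB, if_neg hd, ht, List.countP_cons, Prod.mk.injEq]
        by_cases ho : PySem.Int.mod d 2 ≠ 0
        · rw [if_pos ho]
          have hp : ((PySem.Int.mod d 2 != 0) = true) := by simpa using ho
          simp only [if_pos hp, Prod.mk.injEq]
          refine ⟨by push_cast; ring, by simp [List.contains_cons]; intro h; exact absurd h.symm hd⟩
        · rw [if_neg ho]
          have hp : ¬ ((PySem.Int.mod d 2 != 0) = true) := by simpa using ho
          simp only [if_neg hp, Prod.mk.injEq]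
          refine ⟨by push_cast; ring, by simp [List.contains_cons]; intro h; exact absurd h.symm hd⟩

-- ===== VERDICT (by name: the statement is the Claim_ definition above) =====
theorem oddNumbersBeforeZero_spec : Claim_equal_oddNumbersBeforeZero := by
  unfold Claim_equal_oddNumbersBeforeZero
  intro seq _
  unfold Spec_oddNumbersBeforeZero oddNumbersBeforeZero oddNumbersBeforeZero_alt
  rw [pvFoldB_eq]
  by_cases h0 : (0 : Int) ∈ seq
  · simp [h0, pvLoopA_eq]
  · simp [h0]
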